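-- pv_equiv track=rewrite | github.com/EmrysSniper/RITA-Graph-Visualization- | Aircraft_Incident_cityscape_graph.py | map_injury_level
-- ===== SOURCE A (Python) =====
-- def map_injury_level(injury_set):
--     if not injury_set or 'Unknown' in injury_set:
--         return 0
--     if any('Fatal' in i for i in injury_set):
--         return 4
--     if any('Serious' in i for i in injury_set):
--         return 3
--     if any('Minor' in i for i in injury_set):
--         return 2
--     if any('None' in i for i in injury_set):
--         return 1
--     return 0
-- ===== SOURCE B (Python) =====
-- def map_injury_level(injury_set):
--     if not injury_set or 'Unknown' in injury_set:
--         return 0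
--     best = 0
--     for i in injury_set:
--         if 'Fatal' in i:
--             s = 4
--         elif 'Serious' in i:
--             s = 3
--         elif 'Minor' in i:
--             s = 2
--         elif 'None' in i:
--             s = 1
--         else:
--             s = 0
--         if s > best:
--             best = s
--     return best
-- ===== Notes on version B (the rewrite author's own statement) =====
-- stated objective: simpler
-- what changed: Replaces the four separate any(...) scans over the list with a single accumulating pass that keeps the maximum per-element severity.
import Mathlib
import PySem

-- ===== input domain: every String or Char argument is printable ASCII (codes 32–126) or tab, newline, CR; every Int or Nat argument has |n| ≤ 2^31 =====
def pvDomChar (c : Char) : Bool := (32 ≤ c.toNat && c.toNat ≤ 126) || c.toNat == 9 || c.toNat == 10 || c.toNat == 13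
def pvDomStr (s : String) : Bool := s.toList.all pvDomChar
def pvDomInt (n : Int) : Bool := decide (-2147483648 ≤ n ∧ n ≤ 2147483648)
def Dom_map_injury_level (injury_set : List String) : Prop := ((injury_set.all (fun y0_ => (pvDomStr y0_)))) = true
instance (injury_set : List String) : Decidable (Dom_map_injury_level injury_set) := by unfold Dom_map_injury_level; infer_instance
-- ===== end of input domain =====

-- B replaces A's four separate any(...) scans with one accumulating max pass (objective: simpler).

-- ===== PORT A =====
def map_injury_level (injury_set : List String) : Int :=
  if injury_set = [] ∨ injury_set.contains "Unknown" then 0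
  else if injury_set.any (fun i => PySem.Str.isIn "Fatal" i) then 4
  else if injury_set.any (fun i => PySem.Str.isIn "Serious" i) then 3
  else if injury_set.any (fun i => PySem.Str.isIn "Minor" i) then 2
  else if injury_set.any (fun i => PySem.Str.isIn "None" i) then 1
  else 0

-- ===== PORT B =====
-- per-element severity (the if/elif chain of Source B)
def sevOf (i : String) : Int :=
  if PySem.Str.isIn "Fatal" i then 4
  else if PySem.Str.isIn "Serious" i then 3
  else if PySem.Str.isIn "Minor" i then 2
  else if PySem.Str.isIn "None" i then 1
  else 0

def map_injury_level_alt (injury_set : List String) : Int :=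
  if injury_set = [] ∨ injury_set.contains "Unknown" then 0
  else injury_set.foldl (fun best i => if sevOf i > best then sevOf i else best) 0

-- ===== PRECONDITION & SPEC =====
def Spec_map_injury_level (injury_set : List String) (out : Int) : Prop := out = map_injury_level_alt injury_set
instance (injury_set : List String) (out : Int) : Decidable (Spec_map_injury_level injury_set out) := by unfold Spec_map_injury_level; infer_instance

-- ===== CLAIM (what is proved, stated in full; the proofs are below) =====
def Claim_equal_map_injury_level : Prop := ∀ (injury_set : List String), Dom_map_injury_level injury_set → Spec_map_injury_level injury_set (map_injury_level injury_set)

-- ===== LEMMAS AND PROOFS =====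

-- A's body after the guard, as a function (used only in the proofs)
def chainOf (l : List String) : Int :=
  if l.any (fun i => PySem.Str.isIn "Fatal" i) then 4
  else if l.any (fun i => PySem.Str.isIn "Serious" i) then 3
  else if l.any (fun i => PySem.Str.isIn "Minor" i) then 2
  else if l.any (fun i => PySem.Str.isIn "None" i) then 1
  else 0

lemma chainOf_cons (i : String) (l : List String) :
    chainOf (i :: l) = max (sevOf i) (chainOf l) := by
  unfold chainOf sevOf
  cases hF : PySem.Str.isIn "Fatal" i <;>
  cases hS : PySem.Str.isIn "Serious" i <;>
  cases hM : PySem.Str.isIn "Minor" i <;>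
  cases hN : PySem.Str.isIn "None" i <;>
    simp only [List.any_cons, hF, hS, hM, hN, Bool.false_or, Bool.true_or,
      if_true, if_false, Bool.false_eq_true] <;>
    split_ifs <;> omega

lemma foldl_max_chain (l : List String) (b : Int) (hb : 0 ≤ b) :
    l.foldl (fun best i => if sevOf i > best then sevOf i else best) b
      = max b (chainOf l) := by
  induction l generalizing b with
  | nil => simp [chainOf]; omega
  | cons i l ih =>
      rw [List.foldl_cons, chainOf_cons]
      have h1 : (if sevOf i > b then sevOf i else b) = max b (sevOf i) := by
        split_ifs <;> omega
      rw [h1, ih _ (le_trans hb (le_max_left _ _))]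
      omega

lemma chainOf_nonneg (l : List String) : 0 ≤ chainOf l := by
  unfold chainOf; split_ifs <;> omega

-- ===== VERDICT (by name: the statement is the Claim_ definition above) =====
theorem map_injury_level_spec : Claim_equal_map_injury_level := by
  intro l _
  unfold Spec_map_injury_level map_injury_level map_injury_level_alt
  by_cases hg : l = [] ∨ l.contains "Unknown"
  · rw [if_pos hg, if_pos hg]
  · rw [if_neg hg, if_neg hg]
    rw [foldl_max_chain l 0 le_rfl]
    have := chainOf_nonneg l
    have h : chainOf l =
      (if l.any (fun i => PySem.Str.isIn "Fatal" i) then (4:Int)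
       else if l.any (fun i => PySem.Str.isIn "Serious" i) then 3
       else if l.any (fun i => PySem.Str.isIn "Minor" i) then 2
       else if l.any (fun i => PySem.Str.isIn "None" i) then 1
       else 0) := rfl
    omega
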